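-- pv_equiv track=rewrite | github.com/carlosresu/esoa | pipelines/drugs/scripts/generic_normalization.py | extract_molecule_block
-- ===== SOURCE A (Python) =====
-- from typing import List, Tuple
--
-- NUMERIC_OR_STRENGTH = "NUMERIC_OR_STRENGTH"
--
-- FORMULATION_WORD = "FORMULATION_WORD"
--
-- ROUTE_WORD = "ROUTE_WORD"
--
-- def extract_molecule_block(tokens: List[str], classifications: List[str]) -> Tuple[List[str], List[str]]:
--     """Capture the contiguous molecule block before strengths/formulations/routes (Section 2)."""
--     block_tokens: List[str] = []
--     block_classes: List[str] = []
--     for token, classification in zip(tokens, classifications):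
--         if classification in {NUMERIC_OR_STRENGTH, FORMULATION_WORD, ROUTE_WORD}:
--             break
--         block_tokens.append(token)
--         block_classes.append(classification)
--     return block_tokens, block_classes
-- ===== SOURCE B (Python) =====
-- from typing import List, Tuple
--
-- NUMERIC_OR_STRENGTH = "NUMERIC_OR_STRENGTH"
-- FORMULATION_WORD = "FORMULATION_WORD"
-- ROUTE_WORD = "ROUTE_WORD"
--
-- _STOP = {NUMERIC_OR_STRENGTH, FORMULATION_WORD, ROUTE_WORD}
--
-- def extract_molecule_block(tokens: List[str], classifications: List[str]) -> Tuple[List[str], List[str]]: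
--     """Find the cutoff index, then slice both lists (no element-by-element appends)."""
--     n = min(len(tokens), len(classifications))
--     i = 0
--     while i < n and classifications[i] not in _STOP:
--         i += 1
--     return tokens[:i], classifications[:i]
-- ===== Notes on version B (the rewrite author's own statement) =====
-- stated objective: alternative
-- what changed: Replaces the accumulate-in-loop over zip with a find-the-cutoff-index scan followed by two slices.
import Mathlib
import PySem

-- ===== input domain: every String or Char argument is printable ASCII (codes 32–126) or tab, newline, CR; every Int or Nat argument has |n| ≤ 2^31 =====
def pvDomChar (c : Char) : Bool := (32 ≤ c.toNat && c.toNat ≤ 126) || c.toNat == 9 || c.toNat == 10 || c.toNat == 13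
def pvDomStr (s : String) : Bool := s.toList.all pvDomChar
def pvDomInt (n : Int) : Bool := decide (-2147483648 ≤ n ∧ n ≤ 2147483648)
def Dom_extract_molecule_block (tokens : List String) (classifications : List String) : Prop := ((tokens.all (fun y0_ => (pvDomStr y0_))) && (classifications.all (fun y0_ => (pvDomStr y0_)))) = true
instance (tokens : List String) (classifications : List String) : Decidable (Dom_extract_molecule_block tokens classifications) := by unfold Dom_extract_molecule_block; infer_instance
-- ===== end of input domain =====

-- B replaces A's accumulate-in-loop over zip with a cutoff-index scan followed by two slices (alternative decomposition, same cost).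

-- ===== PORT A =====
-- the stop set {NUMERIC_OR_STRENGTH, FORMULATION_WORD, ROUTE_WORD}
def pvStop (c : String) : Bool :=
  c == "NUMERIC_OR_STRENGTH" || c == "FORMULATION_WORD" || c == "ROUTE_WORD"

-- the loop over zip(tokens, classifications) with the two growing accumulators and break
def pvLoopA (bt bc : List String) : List (String × String) → List String × List String
  | [] => (bt, bc)
  | (t, c) :: rest =>
    if pvStop c then (bt, bc)
    else pvLoopA (bt ++ [t]) (bc ++ [c]) rest

def extract_molecule_block (tokens : List String) (classifications : List String) : List String × List String :=
  pvLoopA [] [] (tokens.zip classifications)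

-- ===== PORT B =====
-- the while loop: scan for the first stop classification, bounded by min of the lengths
def pvCut : List String → List String → Nat
  | _ :: ts, c :: cs => if pvStop c then 0 else 1 + pvCut ts cs
  | _, _ => 0

def extract_molecule_block_alt (tokens : List String) (classifications : List String) : List String × List String :=
  let i := pvCut tokens classifications
  (tokens.take i, classifications.take i)

-- ===== PRECONDITION & SPEC =====
def Spec_extract_molecule_block (tokens : List String) (classifications : List String) (out : List String × List String) : Prop := out = extract_molecule_block_alt tokens classifications
instance (tokens : List String) (classifications : List String) (out : List String × List String) : Decidable (Spec_extract_molecule_block tokens classifications out) := by unfold Spec_extract_molecule_block; infer_instance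

-- ===== CLAIM (what is proved, stated in full; the proofs are below) =====
def Claim_equal_extract_molecule_block : Prop := ∀ (tokens : List String) (classifications : List String), Dom_extract_molecule_block tokens classifications → Spec_extract_molecule_block tokens classifications (extract_molecule_block tokens classifications)

-- ===== LEMMAS AND PROOFS =====
theorem pvLoopA_eq (ts cs bt bc : List String) :
    pvLoopA bt bc (ts.zip cs) = (bt ++ ts.take (pvCut ts cs), bc ++ cs.take (pvCut ts cs)) := by
  induction ts generalizing cs bt bc with
  | nil => simp [pvLoopA, pvCut]
  | cons t ts ih =>
    cases cs with
    | nil => simp [pvLoopA, pvCut]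
    | cons c cs =>
      by_cases h : pvStop c
      · simp [pvLoopA, pvCut, h]
      · simp [pvLoopA, pvCut, h, ih, Nat.add_comm 1, List.take_succ_cons]

-- ===== VERDICT (by name: the statement is the Claim_ definition above) =====
theorem extract_molecule_block_spec : Claim_equal_extract_molecule_block := by
  intro ts cs _
  show _ = _
  simp [extract_molecule_block, extract_molecule_block_alt, pvLoopA_eq]
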